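-- pv_equiv track=rewrite | github.com/Alset-Nikolas/YandexAlgorithmTraining5 | lessons/1_ComplexityTestingSpecialCases/tasks/F_MishaMathematics/main.py | get_plan_to_calc
-- ===== SOURCE A (Python) =====
-- def get_plan_to_calc(numbers: list[int]) -> str:
-- 	'''
--
-- 	:param numbers: числа между кототрыми нужно поставить + *
-- 	:return: Строка из + * в результате применения которых получается нечётный результат.
-- 	'''
--
-- 	if not numbers:
-- 		return ''
-- 	result = []
-- 	last_2k_1 = None if numbers[0] % 2 == 0 else 0
-- 	res = 0 if numbers[0] % 2 == 0 else 1
-- 	for i in range(len(numbers)-1):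
-- 		x_i = numbers[i]
-- 		x_next = numbers[i+1]
--
-- 		result.append('+')
--
-- 		if x_next % 2 == 1:
-- 			last_2k_1 = i
-- 			res += 1
--
-- 	if res % 2 == 0:
-- 		result[last_2k_1] = 'x'
-- 	return ''.join(result)
-- ===== SOURCE B (Python) =====
-- def get_plan_to_calc(numbers: list[int]) -> str:
-- 	'''
--
-- 	:param numbers: числа между кототрыми нужно поставить + *
-- 	:return: Строка из + * в результате применения которых получается нечётный результат.
-- 	'''
--
-- 	if not numbers:
-- 		return ''
-- 	n = len(numbers)
-- 	if sum(x % 2 for x in numbers) % 2: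
-- 		return '+' * (n - 1)
-- 	j = n - 1
-- 	while j >= 0 and numbers[j] % 2 == 0:
-- 		j -= 1
-- 	return '+' * (j - 1) + 'x' + '+' * (n - 1 - j)
-- ===== Notes on version B (the rewrite author's own statement) =====
-- stated objective: alternative
-- what changed: Replaces A's single forward pass (appending '+' per gap while tracking a running parity counter and the last odd index, then mutating one cell) with three staged steps: a parity check via sum(x % 2), an early-exit backward while-scan from the right end that finds the last odd without visiting the rest of the list, and output built by string repetition/concatenation of three pieces instead of list mutation.
import Mathlib
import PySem

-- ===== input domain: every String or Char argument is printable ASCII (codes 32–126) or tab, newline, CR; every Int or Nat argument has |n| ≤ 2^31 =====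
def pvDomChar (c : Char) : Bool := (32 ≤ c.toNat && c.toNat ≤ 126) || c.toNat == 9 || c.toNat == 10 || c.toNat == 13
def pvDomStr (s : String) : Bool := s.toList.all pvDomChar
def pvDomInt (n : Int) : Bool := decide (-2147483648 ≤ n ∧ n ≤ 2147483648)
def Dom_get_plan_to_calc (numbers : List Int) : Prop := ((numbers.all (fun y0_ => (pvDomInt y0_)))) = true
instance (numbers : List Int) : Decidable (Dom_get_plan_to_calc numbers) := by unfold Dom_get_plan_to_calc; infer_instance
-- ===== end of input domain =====

-- B replaces A's single forward pass (parity counter + last-odd tracker + appended list,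
-- one mutation) with staged steps: parity via a sum of x%2, a backward early-exit while-scan
-- for the last odd, and the answer assembled by concatenating three repeated pieces.
-- Pre_ excludes nonempty all-even lists, on which A raises TypeError (result[None] = 'x').


-- ===== PORT A =====
-- loop body of A's 'for i in range(len(numbers)-1)': state = (result, last_2k_1, res)
def pvLoopA (numbers : List Int) (s : List Char × Option Int × Int) (i : Int) : List Char × Option Int × Int :=
  -- x_i := numbers[i] is computed by A but unused
  let x_next := PySem.List.pyGetD numbers (i + 1) 0
  let result := s.1 ++ ['+']
  if PySem.Int.mod x_next 2 = 1 then (result, some i, s.2.2 + 1)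
  else (result, s.2.1, s.2.2)

def get_plan_to_calc (numbers : List Int) : String :=
  if numbers = [] then "" else
  let h0 := PySem.List.pyGetD numbers 0 0
  let last0 : Option Int := if PySem.Int.mod h0 2 = 0 then none else some 0
  let res0 : Int := if PySem.Int.mod h0 2 = 0 then 0 else 1
  let st := (PySem.List.pyRange 0 ((numbers.length : Int) - 1) 1).foldl (pvLoopA numbers) ([], last0, res0)
  if PySem.Int.mod st.2.2 2 = 0 then
    match st.2.1 with
    | some j => String.mk (PySem.List.pySetD st.1 j 'x')
    | none => ""   -- Python raises TypeError here (result[None]); excluded by Pre_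
  else String.mk st.1

-- ===== PORT B =====
-- the 'while j >= 0 and numbers[j] % 2 == 0: j -= 1' loop; argument k encodes j = k - 1
def pvBack (numbers : List Int) : Nat → Int
  | 0 => -1
  | k + 1 =>
    if PySem.Int.mod (PySem.List.pyGetD numbers (k : Int) 0) 2 = 0 then pvBack numbers k
    else (k : Int)

def get_plan_to_calc_alt (numbers : List Int) : String :=
  if numbers = [] then "" else
  let n := numbers.length
  if PySem.Int.mod ((numbers.map (fun x => PySem.Int.mod x 2)).sum) 2 ≠ 0 then
    String.mk (List.replicate (n - 1) '+')
  else
    let j := pvBack numbers n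
    String.mk (List.replicate (j - 1).toNat '+' ++ ['x'] ++ List.replicate ((n : Int) - 1 - j).toNat '+')

-- ===== PRECONDITION & SPEC =====
-- Pre_ excludes exactly the nonempty all-even lists: there A raises TypeError (result[None] = 'x').
def Pre_get_plan_to_calc (numbers : List Int) : Prop :=
  numbers = [] ∨ (∃ x ∈ numbers, PySem.Int.mod x 2 = 1)
instance (numbers : List Int) : Decidable (Pre_get_plan_to_calc numbers) := by unfold Pre_get_plan_to_calc; infer_instance
def pvWitness_get_plan_to_calc : List Int := [1, 2]

def Spec_get_plan_to_calc (numbers : List Int) (out : String) : Prop := out = get_plan_to_calc_alt numbers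
instance (numbers : List Int) (out : String) : Decidable (Spec_get_plan_to_calc numbers out) := by unfold Spec_get_plan_to_calc; infer_instance

-- ===== CLAIM (what is proved, stated in full; the proofs are below) =====
def Claim_equal_get_plan_to_calc : Prop := ∀ (numbers : List Int), Dom_get_plan_to_calc numbers → Pre_get_plan_to_calc numbers → Spec_get_plan_to_calc numbers (get_plan_to_calc numbers)

-- ===== LEMMAS AND PROOFS =====

theorem mod2 (x : Int) : PySem.Int.mod x 2 = x % 2 := PySem.Int.mod_eq_emod_of_pos (by norm_num)

-- index (relative) of the LAST odd element of a list, none if all even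
def lastOddRel : List Int -> Option Int
  | [] => none
  | x :: xs =>
    match lastOddRel xs with
    | some k => some (k + 1)
    | none => if x % 2 = 1 then some 0 else none

def oddCount (t : List Int) : Nat := t.countP (fun x => decide (x % 2 = 1))

theorem lastOddRel_none_iff (t : List Int) : lastOddRel t = none ↔ oddCount t = 0 := by
  induction t with
  | nil => simp [lastOddRel, oddCount]
  | cons x xs ih =>
    simp only [lastOddRel, oddCount, List.countP_cons]
    rcases h : lastOddRel xs with _ | k
    · have h0 : oddCount xs = 0 := ih.mp h
      simp only [oddCount] at h0
      by_cases hx : x % 2 = 1 <;> simp [hx, h0]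
    · have h1 : oddCount xs ≠ 0 := fun hc => by simp [ih.mpr hc] at h
      simp only [oddCount] at h1
      constructor
      · intro hc; exact absurd hc (by simp)
      · intro hc; split_ifs at hc <;> omega

theorem lastOddRel_bounds (t : List Int) : ∀ k, lastOddRel t = some k → 0 ≤ k ∧ k < t.length := by
  induction t with
  | nil => intro k hk; simp [lastOddRel] at hk
  | cons x xs ih =>
    intro k hk
    simp only [lastOddRel] at hk
    rcases h : lastOddRel xs with _ | m <;> rw [h] at hk
    · split_ifs at hk with hx
      · injection hk with h2
        subst h2
        simp
    · injection hk with h2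
      subst h2
      have := ih m h
      simp only [List.length_cons]
      omega

theorem lastOddRel_append_singleton (ys : List Int) (x : Int) :
    lastOddRel (ys ++ [x]) = if x % 2 = 1 then some (ys.length : Int) else lastOddRel ys := by
  induction ys with
  | nil => by_cases hx : x % 2 = 1 <;> simp [lastOddRel, hx]
  | cons y ys ih =>
    simp only [List.cons_append, lastOddRel, ih]
    by_cases hx : x % 2 = 1
    · simp only [hx, if_pos rfl, List.length_cons]
      push_cast
      ring_nf
    · simp [hx]

theorem sum_mods (t : List Int) : ((t.map (fun x => x % 2)).sum) = (oddCount t : Int) := by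
  induction t with
  | nil => simp [oddCount]
  | cons x xs ih =>
    simp only [List.map_cons, List.sum_cons, oddCount, List.countP_cons]
    simp only [oddCount] at ih
    rcases Int.emod_two_eq x with hx | hx <;> simp [hx, ih] <;> push_cast <;> omega

theorem pvBack_spec (numbers : List Int) :
    ∀ (k : Nat), k ≤ numbers.length →
      pvBack numbers k = (lastOddRel (numbers.take k)).getD (-1) := by
  intro k
  induction k with
  | zero => intro _; simp [pvBack, lastOddRel]
  | succ k ih =>
    intro hk
    have hklt : k < numbers.length := by omega
    have hget : PySem.List.pyGetD numbers (k : Int) 0 = numbers[k] := by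
      rw [PySem.List.pyGetD_eq_getElem numbers 0 (by positivity) (by exact_mod_cast hklt)]
      simp
    have htake : numbers.take (k + 1) = numbers.take k ++ [numbers[k]] :=
      List.take_succ_eq_append_getElem hklt  -- name may differ; fixed below if needed
    rw [pvBack, hget, htake, lastOddRel_append_singleton, mod2]
    rcases Int.emod_two_eq numbers[k] with hx | hx
    · simp [hx, ih (by omega)]
    · simp [hx, List.length_take, Nat.min_eq_left (le_of_lt hklt)]

theorem set_replicate_eq (m k : Nat) (c v : Char) (hk : k < m) :
    (List.replicate m c).set k v
      = List.replicate k c ++ [v] ++ List.replicate (m - 1 - k) c := by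
  have hm : m - (k + 1) = m - 1 - k := by omega
  rw [List.set_eq_take_append_cons_drop, if_pos (by simpa using hk), List.take_replicate,
    List.drop_replicate, Nat.min_eq_left (le_of_lt hk), hm]
  simp

theorem pvLoopA_fold (numbers : List Int) :
    ∀ (t : List Int) (a : Int) (acc : List Char) (last : Option Int) (res : Int),
    0 ≤ a → numbers.drop ((a + 1).toNat) = t → a + 1 + t.length = numbers.length →
    (PySem.List.pyRange a ((numbers.length : Int) - 1) 1).foldl (pvLoopA numbers) (acc, last, res)
      = (acc ++ List.replicate t.length '+',
         (match lastOddRel t with | some k => some (a + k) | none => last),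
         res + (oddCount t : Int)) := by
  intro t
  induction t with
  | nil =>
    intro a acc last res ha hdrop hlen
    have heq : (numbers.length : Int) - 1 = a := by simp at hlen; omega
    rw [heq, PySem.List.pyRange_one_eq_nil (le_refl a)]
    simp [lastOddRel, oddCount]
  | cons x xs ih =>
    intro a acc last res ha hdrop hlen
    have hlt : a < (numbers.length : Int) - 1 := by simp at hlen ⊢; omega
    have hx : PySem.List.pyGetD numbers (a + 1) 0 = x := by
      rw [PySem.List.pyGetD_eq_getElem numbers 0 (by omega) (by omega)]
      have h0 : (numbers.drop ((a+1).toNat))[0]? = some x := by rw [hdrop]; rfl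
      rw [List.getElem?_drop] at h0
      simpa using List.getElem?_eq_some_iff.mp (by simpa using h0) |>.choose_spec.symm ▸ rfl
    have hdrop' : numbers.drop ((a + 1 + 1).toNat) = xs := by
      have hnat : (a + 1 + 1).toNat = (a + 1).toNat + 1 := by omega
      rw [hnat, ← List.drop_drop, hdrop]
      rfl
    have hlen2 : a + 1 + 1 + (xs.length : Int) = numbers.length := by
      simp at hlen ⊢; omega
    rw [PySem.List.pyRange_one_cons hlt, List.foldl_cons]
    have hrep : (acc ++ ['+']) ++ List.replicate xs.length '+'
        = acc ++ List.replicate (x :: xs).length '+' := by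
      simp [List.replicate_succ]
    by_cases hodd : x % 2 = 1
    · have step : pvLoopA numbers (acc, last, res) a = (acc ++ ['+'], some a, res + 1) := by
        simp [pvLoopA, hx, mod2, hodd]
      rw [step, ih (a + 1) (acc ++ ['+']) (some a) (res + 1) (by omega) hdrop' hlen2]
      simp only [Prod.mk.injEq]
      refine ⟨hrep, ?_, ?_⟩
      · rcases h : lastOddRel xs with _ | k <;> simp [lastOddRel, h, hodd] <;> ring
      · simp [oddCount, hodd]; ring
    · have step : pvLoopA numbers (acc, last, res) a = (acc ++ ['+'], last, res) := by
        simp [pvLoopA, hx, mod2, hodd]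
      rw [step, ih (a + 1) (acc ++ ['+']) last res (by omega) hdrop' hlen2]
      simp only [Prod.mk.injEq]
      refine ⟨hrep, ?_, ?_⟩
      · rcases h : lastOddRel xs with _ | k <;> simp [lastOddRel, h, hodd] <;> ring
      · simp [oddCount, hodd]

-- evaluation lemma for A on a nonempty list
theorem A_eval (h : Int) (t : List Int) :
    get_plan_to_calc (h :: t)
      = (if ((if h % 2 = 1 then (1:Int) else 0) + (oddCount t : Int)) % 2 = 0 then
          match (match lastOddRel t with
                 | some k => some k
                 | none => if h % 2 = 1 then some (0:Int) else none) with
          | some j => String.mk (PySem.List.pySetD (List.replicate t.length '+') j 'x')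
          | none => ""
        else String.mk (List.replicate t.length '+')) := by
  have hne : (h :: t : List Int) ≠ [] := List.cons_ne_nil h t
  simp only [get_plan_to_calc, if_neg hne]
  rw [pvLoopA_fold (h :: t) t 0 [] _ _ (le_refl 0) (by norm_num) (by push_cast [List.length_cons]; ring)]
  rcases Int.emod_two_eq h with hh | hh <;> rcases hl : lastOddRel t with _ | k <;>
    simp [hh, mod2, PySem.List.pyGetD_zero_cons]

-- ===== VERDICT (by name: the statement is the Claim_ definition above) =====
theorem get_plan_to_calc_spec : Claim_equal_get_plan_to_calc := by
  intro numbers hdom hpre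
  unfold Spec_get_plan_to_calc
  rcases numbers with _ | ⟨h, t⟩
  · rfl
  · have hne : (h :: t : List Int) ≠ [] := List.cons_ne_nil h t
    rw [A_eval]
    simp only [get_plan_to_calc_alt, if_neg hne, sum_mods, mod2, List.length_cons]
    rw [pvBack_spec (h :: t) (t.length + 1) (by simp),
      show (h :: t).take (t.length + 1) = h :: t from by
        rw [show t.length + 1 = (h :: t).length from by simp, List.take_length]]
    have hcnt0 : oddCount (h :: t) = oddCount t + (if h % 2 = 1 then 1 else 0) := by
      simp [oddCount, List.countP_cons]
    have hcnt : (oddCount (h :: t) : Int) = (if h % 2 = 1 then (1:Int) else 0) + (oddCount t : Int) := by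
      rw [hcnt0]
      split_ifs <;> push_cast <;> ring
    by_cases hpar : ((if h % 2 = 1 then (1:Int) else 0) + (oddCount t : Int)) % 2 = 0
    · -- even total parity: by Pre_, some element is odd, hence t contains an odd element
      have hpos : 0 < oddCount (h :: t) := by
        rw [oddCount, List.countP_pos_iff]
        rcases hpre with hpre | hpre
        · exact absurd hpre hne
        · obtain ⟨x, hmem, hx⟩ := hpre
          exact ⟨x, hmem, by rw [mod2] at hx; simp [hx]⟩
      have ht : oddCount t ≠ 0 := by
        intro h0
        rw [h0] at hpar
        have := hcnt
        rw [h0] at this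
        split_ifs at hpar this <;> omega
      obtain ⟨k, hk⟩ : ∃ k, lastOddRel t = some k := by
        rcases hl : lastOddRel t with _ | k
        · exact absurd ((lastOddRel_none_iff t).mp hl) ht
        · exact ⟨k, rfl⟩
      have hb := lastOddRel_bounds t k hk
      have hbk : (lastOddRel (h :: t)).getD (-1) = k + 1 := by
        simp [lastOddRel, hk]
      have hpar' : ¬ ((oddCount (h :: t) : Int) % 2 ≠ 0) := by
        rw [hcnt]; omega
      rw [if_pos hpar, hk]
      have hkn : k.toNat < t.length := by omega
      have e1 : (k + 1 - 1).toNat = k.toNat := by omega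
      have e2 : (((t.length + 1 : Nat) : Int) - 1 - (k + 1)).toNat = t.length - 1 - k.toNat := by
        omega
      simp only [if_neg hpar', hbk, e1, e2]
      rw [PySem.List.pySetD_of_nonneg, set_replicate_eq t.length k.toNat '+' 'x' hkn]
      exact hb.1
    · have hpar' : (oddCount (h :: t) : Int) % 2 ≠ 0 := by
        rw [hcnt]; omega
      rw [if_neg hpar, if_pos hpar']
      simp only [Nat.add_sub_cancel]
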